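-- pv_equiv track=rewrite | github.com/sauz-zeth/vbox-home | py/ege24.164v4.py | markup
-- ===== SOURCE A (Python) =====
-- def markup(s):
--     pc = s[0]
--     a = []
--     for c in s:
--         a.append(c)
--
--         if c != pc:
--             a.append('*')
--
--         pc = c
--
--     return ''.join(a)
-- ===== SOURCE B (Python) =====
-- def markup(s):
--     # Walk s run by run: each iteration finds the maximal run of equal
--     # characters starting at i; the first run is emitted verbatim, every
--     # later run as its first char + '*' + the rest of the run.
--     out = []
--     i = 0
--     n = len(s)
--     while i < n:
--         c = s[i]
--         j = i + 1
--         while j < n and s[j] == c: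
--             j += 1
--         if i == 0:
--             out.append(s[i:j])
--         else:
--             out.append(c + '*' + s[i + 1:j])
--         i = j
--     return ''.join(out)
-- ===== Notes on version B (the rewrite author's own statement) =====
-- stated objective: alternative
-- what changed: B replaces A's single pass with a previous-character state variable by a run decomposition: it walks the string run by maximal run of equal characters, emitting each run after the first as its first character, a star, then the rest of the run.
-- crash fix: A raises IndexError on the empty string (it evaluates s[0]); B naturally returns the empty string there. — e.g. on markup(""): A raises IndexError, B returns ""
import Mathlib
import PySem

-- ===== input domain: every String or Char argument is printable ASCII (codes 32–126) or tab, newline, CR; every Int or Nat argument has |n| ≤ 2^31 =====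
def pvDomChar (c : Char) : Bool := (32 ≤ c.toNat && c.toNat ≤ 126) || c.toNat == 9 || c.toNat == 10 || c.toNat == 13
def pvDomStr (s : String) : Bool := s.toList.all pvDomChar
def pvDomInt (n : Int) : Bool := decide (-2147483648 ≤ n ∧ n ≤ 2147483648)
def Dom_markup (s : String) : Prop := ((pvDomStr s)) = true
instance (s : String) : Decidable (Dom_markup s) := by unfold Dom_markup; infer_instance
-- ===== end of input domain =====

-- B is a run-decomposition (maximal equal-character runs) instead of A's previous-character state pass; A raises on "" (excluded by Pre_), B returns "".

-- ===== PORT A =====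
-- pc = s[0]; a = []; for c in s: a.append(c); if c != pc: a.append('*'); pc = c; return ''.join(a)
def markup (s : String) : String :=
  match PySem.Str.pyGet? s 0 with
  | none => ""   -- s = "": Python raises IndexError; excluded by Pre_markup
  | some pc0 =>
    String.ofList
      ((s.toList.foldl
        (fun (st : Char × List Char) c =>
          (c, (st.2 ++ [c]) ++ (if c != st.1 then ['*'] else [])))
        (pc0, ([] : List Char))).2)

-- ===== PORT B =====
-- recursive run splitter: take the maximal run of the head char, emit it
-- (verbatim if first, else head + '*' + rest), recurse on the remainder
def markupEmit : List Char → Bool → List Char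
  | [], _ => []
  | c :: rest, first =>
    let run := c :: rest.takeWhile (· == c)
    (if first then run else c :: '*' :: rest.takeWhile (· == c))
      ++ markupEmit (rest.dropWhile (· == c)) false
termination_by cs _ => cs.length
decreasing_by
  simp only [List.length_cons]
  exact Nat.lt_succ_of_le (List.length_dropWhile_le _ _)

def markup_alt (s : String) : String :=
  String.ofList (markupEmit s.toList true)

-- ===== PRECONDITION & SPEC =====
-- A evaluates s[0], so it raises IndexError exactly on the empty string.
def Pre_markup (s : String) : Prop := s ≠ ""
instance (s : String) : Decidable (Pre_markup s) := by unfold Pre_markup; infer_instance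
def pvWitness_markup : String := "ab*ba"

-- A raises IndexError on the empty string (s[0]); B naturally returns '' there.
def Raises_markup (s : String) : Prop := s = ""
instance (s : String) : Decidable (Raises_markup s) := by unfold Raises_markup; infer_instance
def pvRaiseWitness_markup : String := ""
def pvRaiseWitnessOut_markup : String := ""

def Spec_markup (s : String) (out : String) : Prop := out = markup_alt s
instance (s : String) (out : String) : Decidable (Spec_markup s out) := by unfold Spec_markup; infer_instance

-- ===== CLAIM (what is proved, stated in full; the proofs are below) =====
def Claim_equal_markup : Prop := ∀ (s : String), Dom_markup s → Pre_markup s → Spec_markup s (markup s)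
def Claim_raises_markup : Prop := (∀ (s : String), Dom_markup s → Raises_markup s → ¬ Pre_markup s) ∧ (Dom_markup (pvRaiseWitness_markup) ∧ Raises_markup (pvRaiseWitness_markup) ∧ markup_alt (pvRaiseWitness_markup) = pvRaiseWitnessOut_markup)

-- ===== LEMMAS AND PROOFS =====

-- A's loop body as a structural recursion (no accumulator)
def goA : Char → List Char → List Char
  | _, [] => []
  | pc, c :: rest => (if c != pc then [c, '*'] else [c]) ++ goA c rest

theorem foldl_goA (cs : List Char) : ∀ (pc : Char) (acc : List Char),
    (cs.foldl (fun (st : Char × List Char) c =>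
        (c, (st.2 ++ [c]) ++ (if c != st.1 then ['*'] else []))) (pc, acc)).2
      = acc ++ goA pc cs := by
  induction cs with
  | nil => intro pc acc; simp [goA]
  | cons c rest ih =>
    intro pc acc
    simp only [List.foldl_cons, goA, ih]
    by_cases h : (c != pc) = true <;> simp [h]

-- A's recursion from state pc equals: the rest of pc's run, then B's emitter on the remainder
theorem goA_eq_emit (cs : List Char) : ∀ (pc : Char),
    goA pc cs = cs.takeWhile (· == pc) ++ markupEmit (cs.dropWhile (· == pc)) false := by
  induction cs with
  | nil => intro pc; simp [goA, markupEmit]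
  | cons c rest ih =>
    intro pc
    by_cases h : c = pc
    · subst h
      simp [goA, ih c]
    · have hb : (c == pc) = false := by simp [h]
      simp only [goA, List.takeWhile_cons, List.dropWhile_cons, hb, bne, Bool.not_false,
        if_true]
      rw [ih c]
      conv_rhs => rw [markupEmit.eq_def]
      simp

-- ===== VERDICT (by name: the statement is the Claim_ definition above) =====
theorem markup_spec : Claim_equal_markup := by
  intro s _ hpre
  unfold Spec_markup markup markup_alt
  have hne : s.toList ≠ [] := by
    intro h
    apply hpre
    have h2 : String.ofList s.toList = String.ofList [] := by rw [h]
    simpa [String.ofList_toList] using h2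
  obtain ⟨c, rest, hcr⟩ := List.exists_cons_of_ne_nil hne
  rw [hcr]
  have hget : PySem.Str.pyGet? s 0 = some c := by
    have := PySem.Str.pyGet?_natCast s 0
    simp only [Int.natCast_zero] at this
    rw [show ((0:Int) = ((0:Nat):Int)) by norm_num, PySem.Str.pyGet?_natCast, hcr]
    rfl
  rw [hget]
  simp only [List.foldl_cons, bne_self_eq_false, if_false, List.nil_append, List.append_nil,
    Bool.false_eq_true]
  rw [foldl_goA rest c [c], goA_eq_emit rest c]
  conv_rhs => rw [markupEmit.eq_def]
  simp

@[simp] theorem markup_raises : Claim_raises_markup := by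
  unfold Claim_raises_markup
  refine ⟨fun s _ hr hp => hp hr, by decide, by decide, ?_⟩
  show String.ofList (markupEmit "".toList true) = ""
  simp [markupEmit]
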